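-- pv_equiv track=rewrite | github.com/Arsen1302/Code-copy-detector | TestData/solutions/problem_998_4.py | solution_998_4
-- ===== SOURCE A (Python) =====
-- from typing import List
--
-- def solution_998_4(names: List[str]) -> List[str]:
--     ret, ret_set, name2nextSuffix = [], set(), {}
--     for n in names:
--         if n not in name2nextSuffix:
--             ret.append(n)
--             ret_set.add(n)
--             name2nextSuffix[n] = 1
--         else:
--             suffix = name2nextSuffix[n]
--             while n+'('+str(suffix)+')' in ret_set:
--                 suffix += 1
--                 name2nextSuffix[n] += 1
--             name2nextSuffix[n] += 1
--             name2nextSuffix[n+'('+str(suffix)+')'] = 1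
--             ret.append(n+'('+str(suffix)+')')
--     return ret
-- ===== SOURCE B (Python) =====
-- def solution_998_4(names):
--     ret, seen = [], set()
--     for n in names:
--         if n not in seen:
--             ret.append(n)
--             seen.add(n)
--         else:
--             k = 1
--             while n + '(' + str(k) + ')' in seen:
--                 k += 1
--             m = n + '(' + str(k) + ')'
--             ret.append(m)
--             seen.add(m)
--     return ret
-- ===== Notes on version B (the rewrite author's own statement) =====
-- stated objective: simpler
-- what changed: Replaces A's three data structures (originals-only set plus a per-name next-suffix memo dict that both gates the branch and resumes the counter scan) with the single standard 'seen' set of all emitted names, rescanning suffixes from 1 for each duplicate.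
import Mathlib
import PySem

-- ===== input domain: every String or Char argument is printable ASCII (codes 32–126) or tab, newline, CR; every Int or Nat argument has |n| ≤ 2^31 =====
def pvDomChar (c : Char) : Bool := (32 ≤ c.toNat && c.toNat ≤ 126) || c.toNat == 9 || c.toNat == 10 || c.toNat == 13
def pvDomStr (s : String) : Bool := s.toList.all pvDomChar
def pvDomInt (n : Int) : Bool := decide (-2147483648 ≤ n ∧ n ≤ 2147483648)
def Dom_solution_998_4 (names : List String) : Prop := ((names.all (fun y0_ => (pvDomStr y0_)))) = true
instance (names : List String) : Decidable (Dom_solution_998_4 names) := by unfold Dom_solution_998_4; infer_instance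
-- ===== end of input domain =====

-- ===== PORT A =====
-- B's python builds the same expression n+'('+str(k)+')'; shared helper for both ports.
def pvSuffixName (n : String) (k : Int) : String :=
  n ++ "(" ++ PySem.Int.toStr k ++ ")"

-- 'while n+'('+str(suffix)+')' in ret_set: suffix += 1; name2nextSuffix[n] += 1'
-- (the fuel ret_set.length+1 only makes the loop total; it never runs out)
def pvLoopA (retSet : PySem.Set String) (n : String) : Nat → Int × Int → Int × Int
  | 0, st => st
  | f+1, (suffix, cnt) =>
      if pvSuffixName n suffix ∈ retSet then pvLoopA retSet n f (suffix + 1, cnt + 1)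
      else (suffix, cnt)

def pvStepA (st : List String × PySem.Set String × PySem.Dict String Int) (n : String) :
    List String × PySem.Set String × PySem.Dict String Int :=
  match st with
  | (ret, retSet, d) =>
    match d.get? n with
    | none => (ret ++ [n], PySem.Set.add retSet n, d.insert n 1)
    | some s0 =>
        match pvLoopA retSet n (retSet.length + 1) (s0, s0) with
        | (suffix, cnt) =>
            (ret ++ [pvSuffixName n suffix], retSet,
             (d.insert n (cnt + 1)).insert (pvSuffixName n suffix) 1)

def solution_998_4 (names : List String) : List String :=
  (names.foldl pvStepA ([], PySem.Set.empty, PySem.Dict.empty)).1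

-- ===== PORT B =====
-- 'k = 1; while n+'('+str(k)+')' in seen: k += 1' (same totalising fuel remark)
def pvScanB (seen : PySem.Set String) (n : String) : Nat → Int → Int
  | 0, k => k
  | f+1, k => if pvSuffixName n k ∈ seen then pvScanB seen n f (k + 1) else k

def pvStepB (st : List String × PySem.Set String) (n : String) :
    List String × PySem.Set String :=
  match st with
  | (ret, seen) =>
    if n ∈ seen then
      let m := pvSuffixName n (pvScanB seen n (seen.length + 1) 1)
      (ret ++ [m], PySem.Set.add seen m)
    else (ret ++ [n], PySem.Set.add seen n)

def solution_998_4_alt (names : List String) : List String :=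
  (names.foldl pvStepB ([], PySem.Set.empty)).1

-- ===== PRECONDITION & SPEC =====
def Spec_solution_998_4 (names : List String) (out : List String) : Prop := out = solution_998_4_alt names
instance (names : List String) (out : List String) : Decidable (Spec_solution_998_4 names out) := by unfold Spec_solution_998_4; infer_instance

-- ===== CLAIM (what is proved, stated in full; the proofs are below) =====
def Claim_equal_solution_998_4 : Prop := ∀ (names : List String), Dom_solution_998_4 names → Spec_solution_998_4 names (solution_998_4 names)

-- ===== LEMMAS AND PROOFS =====

-- ---- facts about Nat.toDigits 10 ----

theorem pvToDigitsCore_shift : ∀ (n f : Nat) (ds : List Char), n < f →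
    Nat.toDigitsCore 10 f n ds = Nat.toDigits 10 n ++ ds := by
  intro n
  induction n using Nat.strong_induction_on with
  | _ n ih =>
    intro f ds hf
    match f, hf with
    | g+1, hf =>
      rw [Nat.toDigits, Nat.toDigitsCore, Nat.toDigitsCore]
      by_cases h0 : n / 10 = 0
      · simp [h0]
      · have hlt : n / 10 < n := Nat.div_lt_self (by omega) (by norm_num)
        simp only [h0, if_false]
        rw [ih (n/10) hlt g _ (by omega), ih (n/10) hlt n _ (by omega), List.append_assoc]
        simp

theorem pvToDigits_small {n : Nat} (h : n < 10) :
    Nat.toDigits 10 n = [Nat.digitChar n] := by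
  rw [Nat.toDigits, Nat.toDigitsCore]
  have h0 : n / 10 = 0 := Nat.div_eq_of_lt h
  have h1 : n % 10 = n := Nat.mod_eq_of_lt h
  simp [h0, h1]

theorem pvToDigits_peel {n : Nat} (h : 10 ≤ n) :
    Nat.toDigits 10 n = Nat.toDigits 10 (n / 10) ++ [Nat.digitChar (n % 10)] := by
  rw [Nat.toDigits, Nat.toDigitsCore]
  have h0 : n / 10 ≠ 0 := by
    intro hc; have := Nat.div_eq_of_lt (show n < 10 by omega); omega
  simp only [h0, if_false]
  exact pvToDigitsCore_shift (n/10) n _ (Nat.div_lt_self (by omega) (by norm_num))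

theorem pvDigitChar_mem {x : Nat} (h : x < 10) :
    Nat.digitChar x ≠ '(' ∧ Nat.digitChar x ≠ ')' := by
  interval_cases x <;> decide

theorem pvToDigits_mem : ∀ (n : Nat), ∀ c ∈ Nat.toDigits 10 n, c ≠ '(' ∧ c ≠ ')' := by
  intro n
  induction n using Nat.strong_induction_on with
  | _ n ih =>
    intro c hc
    by_cases h : n < 10
    · rw [pvToDigits_small h] at hc
      simp at hc; subst hc; exact pvDigitChar_mem h
    · rw [pvToDigits_peel (by omega)] at hc
      rcases List.mem_append.mp hc with h1 | h1
      · exact ih (n/10) (Nat.div_lt_self (by omega) (by norm_num)) c h1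
      · simp at h1; subst h1
        exact pvDigitChar_mem (Nat.mod_lt _ (by norm_num))

theorem pvDigitChar_inj : ∀ x < 10, ∀ y < 10, Nat.digitChar x = Nat.digitChar y → x = y := by
  decide

theorem pvToDigits_ne_nil (n : Nat) : Nat.toDigits 10 n ≠ [] := by
  by_cases h : n < 10
  · rw [pvToDigits_small h]; simp
  · rw [pvToDigits_peel (by omega)]; simp

theorem pvToDigits_inj : ∀ (a b : Nat), Nat.toDigits 10 a = Nat.toDigits 10 b → a = b := by
  intro a
  induction a using Nat.strong_induction_on with
  | _ a ih =>
    intro b h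
    by_cases ha : a < 10 <;> by_cases hb : b < 10
    · rw [pvToDigits_small ha, pvToDigits_small hb] at h
      simp at h
      exact pvDigitChar_inj a ha b hb h
    · rw [pvToDigits_small ha, pvToDigits_peel (show 10 ≤ b by omega)] at h
      have hlen := congrArg List.length h
      have hpos := List.length_pos_of_ne_nil (pvToDigits_ne_nil (b/10))
      simp only [List.length_append, List.length_cons, List.length_nil] at hlen
      omega
    · rw [pvToDigits_small hb, pvToDigits_peel (show 10 ≤ a by omega)] at h
      have hlen := congrArg List.length h
      have hpos := List.length_pos_of_ne_nil (pvToDigits_ne_nil (a/10))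
      simp only [List.length_append, List.length_cons, List.length_nil] at hlen
      omega
    · rw [pvToDigits_peel (show 10 ≤ a by omega), pvToDigits_peel (show 10 ≤ b by omega)] at h
      have h2 := congrArg List.reverse h
      simp at h2
      obtain ⟨hd, ht⟩ := h2
      have hdiv : a / 10 = b / 10 := by
        have h3 := congrArg List.reverse ht
        simp at h3
        exact ih (a/10) (Nat.div_lt_self (by omega) (by norm_num)) (b/10) h3
      have hmod : a % 10 = b % 10 :=
        pvDigitChar_inj _ (Nat.mod_lt _ (by norm_num)) _ (Nat.mod_lt _ (by norm_num)) hd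
      omega

-- ---- the marker-splitting lemma and injectivity of pvSuffixName ----

theorem pvSplitMarker : ∀ (x1 : List Char) (y1 x2 y2 : List Char),
    (∀ c ∈ x1, c ≠ '(') → (∀ c ∈ x2, c ≠ '(') →
    x1 ++ '(' :: y1 = x2 ++ '(' :: y2 → x1 = x2 ∧ y1 = y2 := by
  intro x1
  induction x1 with
  | nil =>
    intro y1 x2 y2 _ h2 h
    cases x2 with
    | nil => simpa using h
    | cons a l =>
      simp at h
      exact absurd h.1.symm (h2 a (by simp))
  | cons a l ih =>
    intro y1 x2 y2 h1 h2 h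
    cases x2 with
    | nil =>
      simp at h
      exact absurd h.1 (h1 a (by simp))
    | cons b m =>
      simp at h
      obtain ⟨hab, hrest⟩ := h
      obtain ⟨hx, hy⟩ := ih y1 m y2 (fun c hc => h1 c (by simp [hc])) (fun c hc => h2 c (by simp [hc])) hrest
      subst hab hx hy
      simp

theorem pvChars_toStr {k : Int} (hk : 1 ≤ k) :
    (PySem.Int.toStr k).toList = Nat.toDigits 10 k.toNat := by
  rw [PySem.Int.toList_toStr, PySem.Int.toChars]
  simp [show ¬ k < 0 by omega]

theorem pvSuffixName_inj {n m : String} {a b : Int} (ha : 1 ≤ a) (hb : 1 ≤ b)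
    (h : pvSuffixName n a = pvSuffixName m b) : n = m ∧ a = b := by
  have h' := congrArg String.toList h
  simp only [pvSuffixName, String.toList_append] at h'
  rw [pvChars_toStr ha, pvChars_toStr hb, show "(".toList = ['('] by decide,
      show ")".toList = [')'] by decide] at h'
  have h2 := congrArg List.reverse h'
  simp only [List.reverse_append, List.reverse_cons, List.reverse_nil, List.nil_append,
    List.append_assoc, List.cons_append] at h2
  have h3 := List.cons_injective h2
  obtain ⟨hx, hy⟩ := pvSplitMarker ((Nat.toDigits 10 a.toNat).reverse) (n.toList.reverse)
      ((Nat.toDigits 10 b.toNat).reverse) (m.toList.reverse)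
      (fun c hc => (pvToDigits_mem _ c (List.mem_reverse.mp hc)).1)
      (fun c hc => (pvToDigits_mem _ c (List.mem_reverse.mp hc)).1) h3
  have hnm : n = m := String.toList_inj.mp (List.reverse_inj.mp hy)
  have hab : a.toNat = b.toNat := pvToDigits_inj _ _ (List.reverse_inj.mp hx)
  exact ⟨hnm, by omega⟩

theorem pvSuffixName_ne_base (n : String) (k : Int) (hk : 1 ≤ k) :
    pvSuffixName n k ≠ n := by
  intro h
  have h' := congrArg (fun s => s.toList.length) h
  simp only [pvSuffixName, String.toList_append] at h'
  rw [pvChars_toStr hk] at h'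
  have hpos := List.length_pos_of_ne_nil (pvToDigits_ne_nil k.toNat)
  simp only [List.length_append] at h'
  omega

-- ---- scan characterisation ----

theorem pvScanB_spec (s : PySem.Set String) (n : String) :
    ∀ (f : Nat) (k0 : Int),
    (∃ j : Int, k0 ≤ j ∧ j < k0 + f ∧ pvSuffixName n j ∉ s) →
    k0 ≤ pvScanB s n f k0 ∧ pvSuffixName n (pvScanB s n f k0) ∉ s ∧
      ∀ j : Int, k0 ≤ j → j < pvScanB s n f k0 → pvSuffixName n j ∈ s := by
  intro f
  induction f with
  | zero =>
    intro k0 ⟨j, hj1, hj2, _⟩; omega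
  | succ f ih =>
    intro k0 hex
    rw [pvScanB]
    by_cases hmem : pvSuffixName n k0 ∈ s
    · rw [if_pos hmem]
      obtain ⟨j, hj1, hj2, hj3⟩ := hex
      have hj0 : j ≠ k0 := by intro h; subst h; exact hj3 hmem
      obtain ⟨r1, r2, r3⟩ := ih (k0 + 1) ⟨j, by omega, by omega, hj3⟩
      refine ⟨by omega, r2, ?_⟩
      intro j' hj'1 hj'2
      by_cases hj'0 : j' = k0
      · subst hj'0; exact hmem
      · exact r3 j' (by omega) hj'2
    · rw [if_neg hmem]
      exact ⟨le_refl _, hmem, fun j h1 h2 => absurd h2 (by omega)⟩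

theorem pvScan_exists (s : PySem.Set String) (n : String) (k0 : Int) (hk0 : 1 ≤ k0) :
    ∃ j : Int, k0 ≤ j ∧ j < k0 + (s.length + 1) ∧ pvSuffixName n j ∉ s := by
  by_contra hcon
  push Not at hcon
  have hall : ∀ i ∈ List.range (s.length + 1), pvSuffixName n (k0 + (i : Int)) ∈ s := by
    intro i hi
    rw [List.mem_range] at hi
    exact hcon (k0 + (i : Int)) (by omega) (by omega)
  set L : List String := (List.range (s.length + 1)).map (fun i : Nat => pvSuffixName n (k0 + (i : Int))) with hL
  have hnodup : L.Nodup := by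
    rw [hL]
    refine List.Nodup.map_on ?_ List.nodup_range
    intro x hx y hy hxy
    have := (pvSuffixName_inj (n := n) (m := n) (by omega) (by omega) hxy).2
    omega
  have hsub : L ⊆ s := by
    intro x hx
    rw [hL] at hx
    obtain ⟨i, hi, rfl⟩ := List.mem_map.mp hx
    exact hall i hi
  have := List.Subperm.length_le (List.Nodup.subperm hnodup hsub)
  simp [hL] at this

theorem pvLoopA_diag (s : PySem.Set String) (n : String) :
    ∀ (f : Nat) (k : Int), pvLoopA s n f (k, k) = (pvScanB s n f k, pvScanB s n f k) := by
  intro f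
  induction f with
  | zero => intro k; rfl
  | succ f ih =>
    intro k
    rw [pvLoopA, pvScanB]
    by_cases h : pvSuffixName n k ∈ s <;> simp [h, ih]

-- ---- the invariant tying A's (ret_set, name2nextSuffix) to B's seen ----

def pvInv (retSet : PySem.Set String) (d : PySem.Dict String Int) (seen : PySem.Set String) : Prop :=
  (∀ s : String, s ∈ seen ↔ ∃ v, d.get? s = some v) ∧
  (∀ s : String, s ∈ retSet → s ∈ seen) ∧
  (∀ (p : String) (v : Int), d.get? p = some v → 1 ≤ v ∧
      ∀ k : Int, 1 ≤ k → k < v → pvSuffixName p k ∈ seen) ∧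
  (∀ (p : String) (v : Int), d.get? p = some v →
      ∀ k : Int, v ≤ k → (pvSuffixName p k ∈ seen ↔ pvSuffixName p k ∈ retSet)) ∧
  (∀ p : String, d.get? p = none →
      ∀ k : Int, 1 ≤ k → (pvSuffixName p k ∈ seen ↔ pvSuffixName p k ∈ retSet))

theorem pvStep (retSet : PySem.Set String) (d : PySem.Dict String Int)
    (seen : PySem.Set String) (n : String) (hinv : pvInv retSet d seen) :
    ∃ (x : String) (retSet' : PySem.Set String) (d' : PySem.Dict String Int)
      (seen' : PySem.Set String),
      (∀ ret, pvStepA (ret, retSet, d) n = (ret ++ [x], retSet', d')) ∧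
      (∀ ret, pvStepB (ret, seen) n = (ret ++ [x], seen')) ∧ pvInv retSet' d' seen' := by
  obtain ⟨ha, hb, hc, hd, he⟩ := hinv
  cases hget : d.get? n with
  | none =>
    have hnseen : n ∉ seen := by
      intro hn
      obtain ⟨v, hv⟩ := (ha n).mp hn
      rw [hget] at hv
      exact absurd hv (by simp)
    refine ⟨n, PySem.Set.add retSet n, d.insert n 1, PySem.Set.add seen n, ?_, ?_, ?_, ?_, ?_, ?_, ?_⟩
    · intro ret; simp [pvStepA, hget]
    · intro ret; simp [pvStepB, hnseen]
    · -- (a)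
      intro s
      rw [PySem.Set.mem_add]
      by_cases hs : s = n
      · subst hs; simp [PySem.Dict.get?_insert_self]
      · rw [PySem.Dict.get?_insert_of_ne d 1 hs]
        simp only [hs, or_false]
        exact ha s
    · -- (b)
      intro s hs
      rw [PySem.Set.mem_add] at hs ⊢
      rcases hs with hs | hs
      · exact Or.inl (hb s hs)
      · exact Or.inr hs
    · -- (c)
      intro p v hpv
      by_cases hp : p = n
      · rw [hp] at hpv ⊢
        rw [PySem.Dict.get?_insert_self] at hpv
        obtain rfl : (1 : Int) = v := Option.some.inj hpv
        exact ⟨le_refl _, fun k h1 h2 => absurd h2 (by omega)⟩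
      · rw [PySem.Dict.get?_insert_of_ne d 1 hp] at hpv
        obtain ⟨h1, h2⟩ := hc p v hpv
        exact ⟨h1, fun k hk1 hk2 => (PySem.Set.mem_add _ _ _).mpr (Or.inl (h2 k hk1 hk2))⟩
    · -- (d)
      intro p v hpv k hk
      rw [PySem.Set.mem_add, PySem.Set.mem_add]
      by_cases hp : p = n
      · rw [hp] at hpv ⊢
        rw [PySem.Dict.get?_insert_self] at hpv
        obtain rfl : (1 : Int) = v := Option.some.inj hpv
        have hne : pvSuffixName n k ≠ n := pvSuffixName_ne_base n k (by omega)
        simp only [hne, or_false]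
        exact he n hget k (by omega)
      · rw [PySem.Dict.get?_insert_of_ne d 1 hp] at hpv
        by_cases hx : pvSuffixName p k = n
        · simp [hx]
        · simp only [hx, or_false]
          exact hd p v hpv k hk
    · -- (e)
      intro p hp0 k hk
      have hpn : p ≠ n := by
        intro h; subst h; rw [PySem.Dict.get?_insert_self] at hp0; simp at hp0
      rw [PySem.Dict.get?_insert_of_ne d 1 hpn] at hp0
      rw [PySem.Set.mem_add, PySem.Set.mem_add]
      by_cases hx : pvSuffixName p k = n
      · simp [hx]
      · simp only [hx, or_false]
        exact he p hp0 k hk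
  | some s0 =>
    have hs0 : 1 ≤ s0 := (hc n s0 hget).1
    have hnseen : n ∈ seen := (ha n).mpr ⟨s0, hget⟩
    obtain ⟨hA1, hA2, hA3⟩ := pvScanB_spec retSet n (retSet.length + 1) s0 (pvScan_exists retSet n s0 hs0)
    obtain ⟨hB1, hB2, hB3⟩ := pvScanB_spec seen n (seen.length + 1) 1 (pvScan_exists seen n 1 (le_refl _))
    set rA := pvScanB retSet n (retSet.length + 1) s0 with hrA
    set rB := pvScanB seen n (seen.length + 1) 1 with hrB
    have hr : rA = rB := by
      rcases lt_trichotomy rA rB with h | h | h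
      · have h1 : pvSuffixName n rA ∈ seen := hB3 rA (by omega) h
        exact absurd ((hd n s0 hget rA hA1).mp h1) hA2
      · exact h
      · by_cases h2 : rB < s0
        · exact absurd ((hc n s0 hget).2 rB hB1 h2) hB2
        · exact absurd (hb _ (hA3 rB (by omega) h)) hB2
    set x := pvSuffixName n rB with hx
    have hrpos : 1 ≤ rB := hB1
    have hxret : x ∉ retSet := by rw [hx, ← hr]; exact hA2
    have hxd : d.get? x = none := by
      cases hq : d.get? x with
      | none => rfl
      | some w => exact absurd ((ha x).mpr ⟨w, hq⟩) hB2
    have hxn : x ≠ n := pvSuffixName_ne_base n rB hrpos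
    refine ⟨x, retSet, (d.insert n (rB + 1)).insert x 1, PySem.Set.add seen x, ?_, ?_, ?_, ?_, ?_, ?_, ?_⟩
    · intro ret
      simp only [pvStepA, hget, pvLoopA_diag, ← hrA, hr, ← hx]
    · intro ret
      simp only [pvStepB, hnseen, if_true, ← hrB, ← hx]
    · -- (a)
      intro s
      rw [PySem.Set.mem_add]
      by_cases hs : s = x
      · subst hs; simp [PySem.Dict.get?_insert_self]
      · rw [PySem.Dict.get?_insert_of_ne _ 1 hs]
        by_cases hs2 : s = n
        · subst hs2
          rw [PySem.Dict.get?_insert_self]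
          simp [hnseen]
        · rw [PySem.Dict.get?_insert_of_ne d (rB + 1) hs2]
          simp only [hs, or_false]
          exact ha s
    · -- (b)
      intro s hs
      rw [PySem.Set.mem_add]
      exact Or.inl (hb s hs)
    · -- (c)
      intro p v hpv
      by_cases hp : p = x
      · rw [hp] at hpv ⊢
        rw [PySem.Dict.get?_insert_self] at hpv
        obtain rfl : (1 : Int) = v := Option.some.inj hpv
        exact ⟨le_refl _, fun k h1 h2 => absurd h2 (by omega)⟩
      · rw [PySem.Dict.get?_insert_of_ne _ 1 hp] at hpv
        by_cases hp2 : p = n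
        · rw [hp2] at hpv ⊢
          rw [PySem.Dict.get?_insert_self] at hpv
          obtain rfl : rB + 1 = v := Option.some.inj hpv
          refine ⟨by omega, fun k h1 h2 => ?_⟩
          rw [PySem.Set.mem_add]
          by_cases hk2 : k < s0
          · exact Or.inl ((hc n s0 hget).2 k h1 hk2)
          · by_cases hk3 : k < rB
            · exact Or.inl (hb _ (hA3 k (by omega) (by omega)))
            · have hk4 : k = rB := by omega
              exact Or.inr (by rw [hk4, hx])
        · rw [PySem.Dict.get?_insert_of_ne d (rB + 1) hp2] at hpv
          obtain ⟨h1, h2⟩ := hc p v hpv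
          exact ⟨h1, fun k hk1 hk2 => (PySem.Set.mem_add _ _ _).mpr (Or.inl (h2 k hk1 hk2))⟩
    · -- (d)
      intro p v hpv k hk
      rw [PySem.Set.mem_add]
      by_cases hp : p = x
      · rw [hp] at hpv ⊢
        rw [PySem.Dict.get?_insert_self] at hpv
        obtain rfl : (1 : Int) = v := Option.some.inj hpv
        have hne : pvSuffixName x k ≠ x := pvSuffixName_ne_base x k (by omega)
        simp only [hne, or_false]
        exact he x hxd k (by omega)
      · rw [PySem.Dict.get?_insert_of_ne _ 1 hp] at hpv
        by_cases hp2 : p = n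
        · rw [hp2] at hpv ⊢
          rw [PySem.Dict.get?_insert_self] at hpv
          obtain rfl : rB + 1 = v := Option.some.inj hpv
          have hne : pvSuffixName n k ≠ x := by
            intro hcontra
            rw [hx] at hcontra
            have := (pvSuffixName_inj (by omega) hrpos hcontra).2
            omega
          simp only [hne, or_false]
          exact hd n s0 hget k (by omega)
        · rw [PySem.Dict.get?_insert_of_ne d (rB + 1) hp2] at hpv
          have hv1 := (hc p v hpv).1
          have hne : pvSuffixName p k ≠ x := by
            intro hcontra
            rw [hx] at hcontra
            exact hp2 (pvSuffixName_inj (by omega) hrpos hcontra).1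
          simp only [hne, or_false]
          exact hd p v hpv k hk
    · -- (e)
      intro p hp0 k hk
      have hpx : p ≠ x := by
        intro h; subst h; rw [PySem.Dict.get?_insert_self] at hp0; simp at hp0
      rw [PySem.Dict.get?_insert_of_ne _ 1 hpx] at hp0
      have hpn : p ≠ n := by
        intro h; subst h; rw [PySem.Dict.get?_insert_self] at hp0; simp at hp0
      rw [PySem.Dict.get?_insert_of_ne d (rB + 1) hpn] at hp0
      rw [PySem.Set.mem_add]
      have hne : pvSuffixName p k ≠ x := by
        intro hcontra
        rw [hx] at hcontra
        exact hpn (pvSuffixName_inj hk hrpos hcontra).1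
      simp only [hne, or_false]
      exact he p hp0 k hk

theorem pvMain : ∀ (names ret : List String) (retSet : PySem.Set String)
    (d : PySem.Dict String Int) (seen : PySem.Set String), pvInv retSet d seen →
    (names.foldl pvStepA (ret, retSet, d)).1 = (names.foldl pvStepB (ret, seen)).1 := by
  intro names
  induction names with
  | nil => intro ret retSet d seen _; rfl
  | cons n rest ih =>
    intro ret retSet d seen hinv
    obtain ⟨x, retSet', d', seen', hA, hB, hinv'⟩ := pvStep retSet d seen n hinv
    simp only [List.foldl_cons, hA ret, hB ret]
    exact ih (ret ++ [x]) retSet' d' seen' hinv'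

-- ===== VERDICT (by name: the statement is the Claim_ definition above) =====
theorem solution_998_4_spec : Claim_equal_solution_998_4 := by
  intro names _
  unfold Spec_solution_998_4 solution_998_4 solution_998_4_alt
  refine pvMain names [] PySem.Set.empty PySem.Dict.empty PySem.Set.empty ?_
  refine ⟨?_, ?_, ?_, ?_, ?_⟩
  · intro s; simp [PySem.Set.empty, PySem.Dict.empty, PySem.Dict.get?]
  · intro s hs; simp [PySem.Set.empty] at hs
  · intro p v hpv; simp [PySem.Dict.empty, PySem.Dict.get?] at hpv
  · intro p v hpv; simp [PySem.Dict.empty, PySem.Dict.get?] at hpv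
  · intro p _ k _; exact Iff.rfl
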